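-- pv_equiv track=rewrite | github.com/miracl/core | wasm/config64.py | inline_mul1
-- ===== SOURCE A (Python) =====
-- def inline_mul1(N,base)  :
--     str=""
--     str+="\tt=(dchunk)a[0]*b[0]; c[0]=(chunk)t & BMASK_XXX; t=t>>BASEBITS_XXX;\n"
--
--     for i in range(1,N) :
--         k=0;
--         str+="\tt=t"
--         while (k<=i) :
--             str+="+(dchunk)a[{}]*b[{}]".format(k,i-k)
--             k+=1
--         str+="; c[{}]=(chunk)t & BMASK_XXX; ".format(i)
--         str+="t=t>>BASEBITS_XXX;\n"
--
--     for i in range(N,2*N-1) :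
--         k=i-(N-1)
--         str+="\tt=t"
--         while (k<=N-1) :
--             str+="+(dchunk)a[{}]*b[{}]".format(k,i-k)
--             k+=1
--         str+="; c[{}]=(chunk)t & BMASK_XXX; ".format(i)
--         str+="t=t>>BASEBITS_XXX;\n"
--
--     str+="\tc[{}]=(chunk)t;\n".format(2*N-1)
--
--     return str.replace("XXX",base)
-- ===== SOURCE B (Python) =====
-- def inline_mul1(N, base):
--     # Group all N*N product terms by diagonal i = k + j (row-major sweep of the
--     # coefficient matrix), then emit one line per diagonal by dictionary lookup.
--     diag = {}
--     for k in range(N):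
--         for j in range(N):
--             diag.setdefault(k + j, []).append("+(dchunk)a[{}]*b[{}]".format(k, j))
--     lines = ["\tt=(dchunk)a[0]*b[0]; c[0]=(chunk)t & BMASK_XXX; t=t>>BASEBITS_XXX;\n"]
--     lines += ["\tt=t" + "".join(diag[i]) + "; c[{}]=(chunk)t & BMASK_XXX; t=t>>BASEBITS_XXX;\n".format(i)
--               for i in range(1, 2 * N - 1)]
--     lines.append("\tc[{}]=(chunk)t;\n".format(2 * N - 1))
--     return "".join(lines).replace("XXX", base)
-- ===== Notes on version B (the rewrite author's own statement) =====
-- stated objective: alternative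
-- what changed: Instead of walking the diagonals with two bound-computing loops, B sweeps the N x N coefficient matrix row-major and groups every product term a[k]*b[j] into a dictionary of term lists keyed by its diagonal i=k+j, then emits each line by joining one dictionary lookup; no diagonal bounds are ever computed.
import Mathlib
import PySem

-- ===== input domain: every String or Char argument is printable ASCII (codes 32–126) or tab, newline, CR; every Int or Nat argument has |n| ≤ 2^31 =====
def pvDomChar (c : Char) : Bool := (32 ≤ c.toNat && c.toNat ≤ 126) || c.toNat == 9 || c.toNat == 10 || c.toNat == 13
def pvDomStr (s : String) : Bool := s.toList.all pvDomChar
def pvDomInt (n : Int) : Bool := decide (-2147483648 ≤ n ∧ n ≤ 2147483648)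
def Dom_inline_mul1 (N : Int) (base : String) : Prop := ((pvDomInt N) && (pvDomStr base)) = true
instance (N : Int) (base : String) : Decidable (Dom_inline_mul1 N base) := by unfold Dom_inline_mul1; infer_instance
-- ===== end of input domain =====

-- B replaces A's two diagonal loops with a different data structure: a row-major sweep of
-- the N×N product matrix groups every term a[k]*b[j] into a dictionary keyed by its
-- diagonal i=k+j, and each output line is then emitted by one dictionary lookup.

-- shared format-string fragments (both Pythons emit the identical templates)
def pvLine0 : List Char := "\tt=(dchunk)a[0]*b[0]; c[0]=(chunk)t & BMASK_XXX; t=t>>BASEBITS_XXX;\n".toList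
def pvTermKJ (k j : Int) : List Char :=
  "+(dchunk)a[".toList ++ PySem.Int.toChars k ++ "]*b[".toList ++ PySem.Int.toChars j ++ "]".toList
def pvTail (i : Int) : List Char :=
  "; c[".toList ++ PySem.Int.toChars i ++ "]=(chunk)t & BMASK_XXX; ".toList ++ "t=t>>BASEBITS_XXX;\n".toList
def pvLast (N : Int) : List Char := "\tc[".toList ++ PySem.Int.toChars (2 * N - 1) ++ "]=(chunk)t;\n".toList

-- ===== PORT A =====
-- A builds one accumulator string: special i=0 line, rising loop i∈[1,N) with inner while k=0..i,
-- falling loop i∈[N,2N-1) with inner while k=i-(N-1)..N-1, final c[2N-1] line, then replace.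
def inline_mul1 (N : Int) (base : String) : String :=
  let s := pvLine0
  let s := (PySem.List.pyRange 1 N 1).foldl (fun s i =>
    ((s ++ "\tt=t".toList
      |> (PySem.List.pyRange 0 (i + 1) 1).foldl (fun s k => s ++ pvTermKJ k (i - k)))
      ++ pvTail i)) s
  let s := (PySem.List.pyRange N (2 * N - 1) 1).foldl (fun s i =>
    ((s ++ "\tt=t".toList
      |> (PySem.List.pyRange (i - (N - 1)) ((N - 1) + 1) 1).foldl (fun s k => s ++ pvTermKJ k (i - k)))
      ++ pvTail i)) s
  let s := s ++ pvLast N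
  String.ofList (PySem.Chars.replace s "XXX".toList base.toList)

-- ===== PORT B =====
-- diag = {}; for k in range(N): for j in range(N): diag.setdefault(k+j, []).append(term(k,j))
-- (setdefault-then-append is Dict.modify with default [])
def pvDiag (N : Int) : PySem.Dict Int (List (List Char)) :=
  (PySem.List.pyRange 0 N 1).foldl (fun d k =>
    (PySem.List.pyRange 0 N 1).foldl (fun d j =>
      d.modify (k + j) [] (· ++ [pvTermKJ k j])) d) PySem.Dict.empty

-- one middle line of B: "\tt=t" + "".join(diag[i]) + tail  (diag[i] always present for i∈[1,2N-1))
def pvLineB (N i : Int) : List Char := "\tt=t".toList ++ ((pvDiag N).getD i []).flatten ++ pvTail i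

def inline_mul1_alt (N : Int) (base : String) : String :=
  let lines := pvLine0 :: ((PySem.List.pyRange 1 (2 * N - 1) 1).map (pvLineB N) ++ [pvLast N])
  String.ofList (PySem.Chars.replace lines.flatten "XXX".toList base.toList)

-- ===== PRECONDITION & SPEC =====
def Spec_inline_mul1 (N : Int) (base : String) (out : String) : Prop := out = inline_mul1_alt N base
instance (N : Int) (base : String) (out : String) : Decidable (Spec_inline_mul1 N base out) := by unfold Spec_inline_mul1; infer_instance

-- ===== CLAIM (what is proved, stated in full; the proofs are below) =====
def Claim_equal_inline_mul1 : Prop := ∀ (N : Int) (base : String), Dom_inline_mul1 N base → Spec_inline_mul1 N base (inline_mul1 N base)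

-- ===== LEMMAS AND PROOFS =====

-- effect of B's inner loop (over j, fresh distinct keys k+j) on the entry at key i
theorem pv_inner (k : Int) (js : List Int) (hnd : js.Nodup)
    (d : PySem.Dict Int (List (List Char))) (i : Int) :
    (js.foldl (fun d j => d.modify (k + j) [] (· ++ [pvTermKJ k j])) d).getD i []
      = d.getD i [] ++ (if (i - k) ∈ js then [pvTermKJ k (i - k)] else []) := by
  induction js generalizing d with
  | nil => simp
  | cons j js ih =>
    simp only [List.foldl_cons]
    rw [ih (List.Nodup.of_cons hnd)]
    rw [PySem.Dict.getD_modify]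
    by_cases h : i = k + j
    · have hj : i - k = j := by omega
      have hnot : j ∉ js := (List.nodup_cons.mp hnd).1
      simp [h, hnot]
    · have hne : i - k ≠ j := by omega
      simp [h, hne, List.mem_cons]

-- effect of B's outer loop (over k) on the entry at key i
theorem pv_outer (N : Int) (ks : List Int) (d : PySem.Dict Int (List (List Char))) (i : Int) :
    (ks.foldl (fun d k =>
        (PySem.List.pyRange 0 N 1).foldl (fun d j =>
          d.modify (k + j) [] (· ++ [pvTermKJ k j])) d) d).getD i []
      = d.getD i [] ++ ks.flatMap (fun k =>
          if (i - k) ∈ PySem.List.pyRange 0 N 1 then [pvTermKJ k (i - k)] else []) := by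
  induction ks generalizing d with
  | nil => simp
  | cons k ks ih =>
    simp only [List.foldl_cons, List.flatMap_cons]
    rw [ih, pv_inner k _ (PySem.List.nodup_pyRange_one 0 N) d i, List.append_assoc]

theorem pv_diag_getD (N i : Int) :
    (pvDiag N).getD i [] = (PySem.List.pyRange 0 N 1).flatMap (fun k =>
      if 0 ≤ i - k ∧ i - k < N then [pvTermKJ k (i - k)] else []) := by
  unfold pvDiag
  rw [pv_outer]
  simp [PySem.List.mem_pyRange_one]

-- the dictionary entry at i equals A's rising-loop term list (1 ≤ i < N)
theorem pv_line_rise (N i : Int) (h1 : 1 ≤ i) (h2 : i < N) :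
    ((pvDiag N).getD i []).flatten
      = (PySem.List.pyRange 0 (i + 1) 1).flatMap (fun k => pvTermKJ k (i - k)) := by
  rw [pv_diag_getD, PySem.List.pyRange_one_append 0 (i + 1) N (by omega) (by omega),
      List.flatMap_append]
  have hB : ((PySem.List.pyRange (i + 1) N 1).flatMap (fun k =>
      if 0 ≤ i - k ∧ i - k < N then [pvTermKJ k (i - k)] else [])) = [] := by
    rw [List.flatMap_eq_nil_iff]
    intro k hk
    rw [PySem.List.mem_pyRange_one] at hk
    rw [if_neg]
    omega
  rw [hB, List.append_nil]
  rw [List.flatMap_congr (fun k hk => if_pos (by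
    rw [PySem.List.mem_pyRange_one] at hk; omega
    : 0 ≤ i - k ∧ i - k < N))]
  rw [← List.map_eq_flatMap, List.flatMap_def]

-- the dictionary entry at i equals A's falling-loop term list (N ≤ i ≤ 2N-2)
theorem pv_line_fall (N i : Int) (h1 : N ≤ i) (h2 : i ≤ 2 * N - 2) :
    ((pvDiag N).getD i []).flatten
      = (PySem.List.pyRange (i - (N - 1)) ((N - 1) + 1) 1).flatMap (fun k => pvTermKJ k (i - k)) := by
  have hN : ((N : Int) - 1) + 1 = N := by omega
  rw [pv_diag_getD, hN,
      PySem.List.pyRange_one_append 0 (i - (N - 1)) N (by omega) (by omega),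
      List.flatMap_append]
  have hA : ((PySem.List.pyRange 0 (i - (N - 1)) 1).flatMap (fun k =>
      if 0 ≤ i - k ∧ i - k < N then [pvTermKJ k (i - k)] else [])) = [] := by
    rw [List.flatMap_eq_nil_iff]
    intro k hk
    rw [PySem.List.mem_pyRange_one] at hk
    rw [if_neg]
    omega
  rw [hA, List.nil_append]
  rw [List.flatMap_congr (fun k hk => if_pos (by
    rw [PySem.List.mem_pyRange_one] at hk; omega
    : 0 ≤ i - k ∧ i - k < N))]
  rw [← List.map_eq_flatMap, List.flatMap_def]

-- A's two diagonal loops produce exactly B's middle lines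
theorem pv_loops_eq (N : Int) :
    (List.flatMap
          (fun i =>
            "\tt=t".toList ++ (List.flatMap (fun k => pvTermKJ k (i - k)) (PySem.List.pyRange 0 (i + 1) 1) ++ pvTail i))
          (PySem.List.pyRange 1 N 1) ++
        List.flatMap
            (fun i =>
              "\tt=t".toList ++
                (List.flatMap (fun k => pvTermKJ k (i - k)) (PySem.List.pyRange (i - (N - 1)) (N - 1 + 1) 1) ++ pvTail i))
            (PySem.List.pyRange N (2 * N - 1) 1)) =
    List.flatMap (pvLineB N) (PySem.List.pyRange 1 (2 * N - 1) 1) := by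
  by_cases hN : 1 ≤ N
  · rw [PySem.List.pyRange_one_append 1 N (2 * N - 1) hN (by omega), List.flatMap_append]
    congr 1
    · refine List.flatMap_congr (fun i hi => ?_)
      rw [PySem.List.mem_pyRange_one] at hi
      rw [pvLineB, pv_line_rise N i (by omega) (by omega), List.append_assoc]
    · refine List.flatMap_congr (fun i hi => ?_)
      rw [PySem.List.mem_pyRange_one] at hi
      rw [pvLineB, pv_line_fall N i (by omega) (by omega), List.append_assoc]
  · rw [PySem.List.pyRange_one_eq_nil (by omega : N ≤ (1:Int)),
        PySem.List.pyRange_one_eq_nil (by omega : (2*N-1 : Int) ≤ N),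
        PySem.List.pyRange_one_eq_nil (by omega : (2*N-1 : Int) ≤ 1)]
    simp

theorem pv_charlists_eq (N : Int) :
    (let s := pvLine0
     let s := (PySem.List.pyRange 1 N 1).foldl (fun s i =>
       ((s ++ "\tt=t".toList
         |> (PySem.List.pyRange 0 (i + 1) 1).foldl (fun s k => s ++ pvTermKJ k (i - k)))
         ++ pvTail i)) s
     let s := (PySem.List.pyRange N (2 * N - 1) 1).foldl (fun s i =>
       ((s ++ "\tt=t".toList
         |> (PySem.List.pyRange (i - (N - 1)) ((N - 1) + 1) 1).foldl (fun s k => s ++ pvTermKJ k (i - k)))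
         ++ pvTail i)) s
     s ++ pvLast N)
    = (pvLine0 :: ((PySem.List.pyRange 1 (2 * N - 1) 1).map (pvLineB N) ++ [pvLast N])).flatten := by
  simp only [PySem.List.foldl_append_eq_flatMap, List.append_assoc, List.flatten_cons,
    List.flatten_append, List.flatten_nil, List.append_nil, ← List.flatMap_def]
  rw [← pv_loops_eq N, List.append_assoc]

-- ===== VERDICT (by name: the statement is the Claim_ definition above) =====
theorem inline_mul1_spec : Claim_equal_inline_mul1 := by
  intro N base _
  unfold Spec_inline_mul1 inline_mul1 inline_mul1_alt
  exact congrArg (fun l => String.ofList (PySem.Chars.replace l "XXX".toList base.toList)) (pv_charlists_eq N)
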